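-- pv_equiv track=rewrite | github.com/mattdp/lisztomania | composer.py | emacsify
-- ===== SOURCE A (Python) =====
-- def emacsify(rows,star_prefix = 2):
--
-- 	output_text = ''
--
-- 	categories = ["1. morning", "2. afternoon", "3. evening"]
-- 	for category in categories:
-- 		for i in range(star_prefix):
-- 			output_text += "*"
-- 		output_text += f" {category}\n"
-- 		for row in rows:
-- 			if row["timing"] == category:
-- 				for i in range(star_prefix+1):
-- 					output_text += "*"
-- 				output_text += f' {row["name"]}\n'
-- 				if row["detail"] != '':
-- 					output_text += f'{row["detail"]}\n'
--
-- 	return output_text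
-- ===== SOURCE B (Python) =====
-- def emacsify(rows, star_prefix=2):
--     categories = ["1. morning", "2. afternoon", "3. evening"]
--     buckets = {c: [] for c in categories}
--     for row in rows:
--         t = row["timing"]
--         if t in buckets:
--             buckets[t].append(row)
--     header = "*" * star_prefix
--     item = "*" * (star_prefix + 1)
--     out = ""
--     for c in categories:
--         out += header + " " + c + "\n"
--         for row in buckets[c]:
--             out += item + " " + row["name"] + "\n"
--             if row["detail"] != "":
--                 out += row["detail"] + "\n"
--     return out
-- ===== Notes on version B (the rewrite author's own statement) =====
-- stated objective: alternative
-- what changed: B makes one indexing pass that buckets rows by their timing category into a dict and then emits each category's pre-built bucket, building the star prefixes once by string multiplication, instead of rescanning all rows for each category and appending stars one character at a time.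
import Mathlib
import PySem

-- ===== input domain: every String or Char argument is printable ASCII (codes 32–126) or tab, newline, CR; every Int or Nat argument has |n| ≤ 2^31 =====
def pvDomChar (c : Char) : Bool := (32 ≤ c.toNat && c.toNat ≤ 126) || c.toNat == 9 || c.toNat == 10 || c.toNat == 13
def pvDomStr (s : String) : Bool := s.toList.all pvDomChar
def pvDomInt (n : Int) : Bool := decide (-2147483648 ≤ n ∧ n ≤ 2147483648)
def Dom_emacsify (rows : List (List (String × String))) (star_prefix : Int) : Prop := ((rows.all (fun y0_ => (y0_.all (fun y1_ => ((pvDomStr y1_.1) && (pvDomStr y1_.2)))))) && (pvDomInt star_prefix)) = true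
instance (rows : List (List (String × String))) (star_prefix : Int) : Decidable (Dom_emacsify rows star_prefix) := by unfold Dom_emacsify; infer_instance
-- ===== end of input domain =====

-- B buckets rows by timing in one dict pass and emits the buckets, building star prefixes by string multiplication; equivalence is about the return value (neither mutates its input).

-- row[k] for a Python dict row given as an association list (first match); default "" is only
-- reached outside Pre_emacsify, where the Python raises KeyError.
def pvRowGet (row : List (String × String)) (k : String) : String :=
  PySem.Dict.getD (PySem.Dict.mk row) k ""

-- ===== PORT A =====
def emacsify (rows : List (List (String × String))) (star_prefix : Int) : String :=
  let output_text := ""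
  let categories := ["1. morning", "2. afternoon", "3. evening"]
  categories.foldl (fun output_text category =>
    let output_text :=
      (PySem.List.pyRange 0 star_prefix 1).foldl (fun o _ => o ++ "*") output_text
    let output_text := output_text ++ (" " ++ category ++ "\n")
    rows.foldl (fun o row =>
      if pvRowGet row "timing" = category then
        let o := (PySem.List.pyRange 0 (star_prefix + 1) 1).foldl (fun o _ => o ++ "*") o
        let o := o ++ (" " ++ pvRowGet row "name" ++ "\n")
        if pvRowGet row "detail" ≠ "" then o ++ (pvRowGet row "detail" ++ "\n") else o
      else o) output_text) output_text

-- ===== PORT B =====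
-- Python's "s" * n (empty for n ≤ 0)
def pvStrMulGo (s : String) : Nat → String
  | 0 => ""
  | k + 1 => s ++ pvStrMulGo s k

def pvStrMul (s : String) (n : Int) : String := pvStrMulGo s n.toNat

def emacsify_alt (rows : List (List (String × String))) (star_prefix : Int) : String :=
  let categories := ["1. morning", "2. afternoon", "3. evening"]
  let buckets : PySem.Dict String (List (List (String × String))) :=
    categories.foldl (fun d c => PySem.Dict.insert d c []) PySem.Dict.empty
  let buckets := rows.foldl (fun d row =>
    let t := pvRowGet row "timing"
    if PySem.Dict.contains d t then PySem.Dict.modify d t [] (fun l => l ++ [row]) else d) buckets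
  let header := pvStrMul "*" star_prefix
  let item := pvStrMul "*" (star_prefix + 1)
  let out := ""
  categories.foldl (fun out c =>
    let out := out ++ (header ++ " " ++ c ++ "\n")
    (PySem.Dict.getD buckets c []).foldl (fun out row =>
      let out := out ++ (item ++ " " ++ pvRowGet row "name" ++ "\n")
      if pvRowGet row "detail" ≠ "" then out ++ (pvRowGet row "detail" ++ "\n") else out) out) out

-- ===== PRECONDITION & SPEC =====
-- Pre_ excludes exactly the inputs where the Python A raises KeyError: a row without a "timing"
-- key, or a row whose timing is one of the three categories but lacks "name" or "detail".
def Pre_emacsify (rows : List (List (String × String))) (star_prefix : Int) : Prop :=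
  ∀ row ∈ rows, (PySem.Dict.get? (PySem.Dict.mk row) "timing").isSome ∧
    (pvRowGet row "timing" ∈ ["1. morning", "2. afternoon", "3. evening"] →
      (PySem.Dict.get? (PySem.Dict.mk row) "name").isSome ∧
      (PySem.Dict.get? (PySem.Dict.mk row) "detail").isSome)
instance (rows : List (List (String × String))) (star_prefix : Int) : Decidable (Pre_emacsify rows star_prefix) := by unfold Pre_emacsify; infer_instance

def pvWitness_emacsify : (List (List (String × String))) × Int :=
  ([[("timing", "1. morning"), ("name", "run"), ("detail", "5k")],
    [("timing", "3. evening"), ("name", "read"), ("detail", "")]], 2)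

def Spec_emacsify (rows : List (List (String × String))) (star_prefix : Int) (out : String) : Prop := out = emacsify_alt rows star_prefix
instance (rows : List (List (String × String))) (star_prefix : Int) (out : String) : Decidable (Spec_emacsify rows star_prefix out) := by unfold Spec_emacsify; infer_instance

-- ===== CLAIM (what is proved, stated in full; the proofs are below) =====
def Claim_equal_emacsify : Prop := ∀ (rows : List (List (String × String))) (star_prefix : Int), Dom_emacsify rows star_prefix → Pre_emacsify rows star_prefix → Spec_emacsify rows star_prefix (emacsify rows star_prefix)

-- ===== LEMMAS AND PROOFS =====

-- appending one "*" per element of a list = appending the star block at once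
theorem foldl_star_list (l : List Int) : ∀ s : String,
    l.foldl (fun o _ => o ++ "*") s = s ++ pvStrMulGo "*" l.length := by
  induction l with
  | nil => intro s; simp [pvStrMulGo]
  | cons x xs ih =>
      intro s
      simp only [List.foldl_cons, List.length_cons, ih, pvStrMulGo]
      rw [String.append_assoc]

theorem foldl_star (n : Int) (s : String) :
    (PySem.List.pyRange 0 n 1).foldl (fun o _ => o ++ "*") s = s ++ pvStrMul "*" n := by
  rw [foldl_star_list, PySem.List.length_pyRange_one, pvStrMul]
  norm_num

-- a guarded foldl is a foldl over the filtered list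
theorem foldl_filter {α β : Type} (p : α → Bool) (f : β → α → β) (l : List α) :
    ∀ acc, l.foldl (fun a x => if p x then f a x else a) acc = (l.filter p).foldl f acc := by
  induction l with
  | nil => intro acc; rfl
  | cons x xs ih =>
      intro acc
      by_cases h : p x = true <;> simp [List.filter_cons, h, ih]

-- one row pushed into the three-key bucket dict
theorem bucket_step (r : List (String × String)) (a b c : List (List (String × String))) :
    (let t := pvRowGet r "timing"
     if PySem.Dict.contains (PySem.Dict.mk [("1. morning", a), ("2. afternoon", b), ("3. evening", c)]) t then
       PySem.Dict.modify (PySem.Dict.mk [("1. morning", a), ("2. afternoon", b), ("3. evening", c)]) t [] (fun l => l ++ [r])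
     else PySem.Dict.mk [("1. morning", a), ("2. afternoon", b), ("3. evening", c)]) =
    PySem.Dict.mk [("1. morning", if pvRowGet r "timing" = "1. morning" then a ++ [r] else a),
                   ("2. afternoon", if pvRowGet r "timing" = "2. afternoon" then b ++ [r] else b),
                   ("3. evening", if pvRowGet r "timing" = "3. evening" then c ++ [r] else c)] := by
  by_cases h1 : pvRowGet r "timing" = "1. morning"
  · simp [h1, PySem.Dict.contains, PySem.Dict.modify, PySem.Dict.getD, PySem.Dict.get?, PySem.Dict.insert]
  · by_cases h2 : pvRowGet r "timing" = "2. afternoon"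
    · simp [h2, PySem.Dict.contains, PySem.Dict.modify, PySem.Dict.getD, PySem.Dict.get?, PySem.Dict.insert]
    · by_cases h3 : pvRowGet r "timing" = "3. evening"
      · simp [h3, PySem.Dict.contains, PySem.Dict.modify, PySem.Dict.getD, PySem.Dict.get?, PySem.Dict.insert]
      · simp only [PySem.Dict.contains]
        simp [Ne.symm h1, Ne.symm h2, Ne.symm h3, h1, h2, h3]

-- the bucket-building pass over a three-key dict, described by filters
theorem bucket_fold (rows : List (List (String × String)))
    (a b c : List (List (String × String))) :
    rows.foldl (fun d row =>
      let t := pvRowGet row "timing"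
      if PySem.Dict.contains d t then PySem.Dict.modify d t [] (fun l => l ++ [row]) else d)
      (PySem.Dict.mk [("1. morning", a), ("2. afternoon", b), ("3. evening", c)]) =
    PySem.Dict.mk [("1. morning", a ++ rows.filter (fun r => pvRowGet r "timing" == "1. morning")),
                   ("2. afternoon", b ++ rows.filter (fun r => pvRowGet r "timing" == "2. afternoon")),
                   ("3. evening", c ++ rows.filter (fun r => pvRowGet r "timing" == "3. evening"))] := by
  induction rows generalizing a b c with
  | nil => simp
  | cons r rs ih =>
      rw [List.foldl_cons, bucket_step, ih]
      by_cases h1 : pvRowGet r "timing" = "1. morning" <;>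
        by_cases h2 : pvRowGet r "timing" = "2. afternoon" <;>
          by_cases h3 : pvRowGet r "timing" = "3. evening" <;>
            simp [h1, h2, h3]

-- one category segment: A's scan-and-filter emit equals B's bucket emit
theorem segment_eq (rows : List (List (String × String))) (star_prefix : Int)
    (cat : String) (out : String) :
    rows.foldl (fun o row =>
      if pvRowGet row "timing" = cat then
        let o := (PySem.List.pyRange 0 (star_prefix + 1) 1).foldl (fun o _ => o ++ "*") o
        let o := o ++ (" " ++ pvRowGet row "name" ++ "\n")
        if pvRowGet row "detail" ≠ "" then o ++ (pvRowGet row "detail" ++ "\n") else o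
      else o)
      ((PySem.List.pyRange 0 star_prefix 1).foldl (fun o _ => o ++ "*") out ++ (" " ++ cat ++ "\n")) =
    (rows.filter (fun r => pvRowGet r "timing" == cat)).foldl (fun o row =>
      let o := o ++ (pvStrMul "*" (star_prefix + 1) ++ " " ++ pvRowGet row "name" ++ "\n")
      if pvRowGet row "detail" ≠ "" then o ++ (pvRowGet row "detail" ++ "\n") else o)
      (out ++ (pvStrMul "*" star_prefix ++ " " ++ cat ++ "\n")) := by
  have hfun : (fun (o : String) (row : List (String × String)) =>
      if pvRowGet row "timing" = cat then
        let o := (PySem.List.pyRange 0 (star_prefix + 1) 1).foldl (fun o _ => o ++ "*") o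
        let o := o ++ (" " ++ pvRowGet row "name" ++ "\n")
        if pvRowGet row "detail" ≠ "" then o ++ (pvRowGet row "detail" ++ "\n") else o
      else o)
    = (fun (o : String) (row : List (String × String)) =>
      if (fun r => pvRowGet r "timing" == cat) row then
        (fun (o : String) (row : List (String × String)) =>
          let o := o ++ (pvStrMul "*" (star_prefix + 1) ++ " " ++ pvRowGet row "name" ++ "\n")
          if pvRowGet row "detail" ≠ "" then o ++ (pvRowGet row "detail" ++ "\n") else o) o row
      else o) := by
    funext o row
    simp only [beq_iff_eq]
    by_cases h : pvRowGet row "timing" = cat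
    · simp only [h, if_true, foldl_star]
      by_cases hd : pvRowGet row "detail" = "" <;> simp [hd, String.append_assoc]
    · simp [h]
  rw [hfun, foldl_filter, foldl_star]
  congr 1
  simp [String.append_assoc]

-- ===== VERDICT (by name: the statement is the Claim_ definition above) =====
theorem emacsify_spec : Claim_equal_emacsify := by
  intro rows star_prefix _ _
  unfold Spec_emacsify emacsify emacsify_alt
  simp only [List.foldl_cons, List.foldl_nil]
  rw [show (PySem.Dict.insert (PySem.Dict.insert (PySem.Dict.insert PySem.Dict.empty
        "1. morning" ([] : List (List (String × String)))) "2. afternoon" []) "3. evening" []) =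
      PySem.Dict.mk [("1. morning", []), ("2. afternoon", []), ("3. evening", [])] from rfl]
  rw [bucket_fold]
  rw [segment_eq, segment_eq, segment_eq]
  simp [PySem.Dict.getD, PySem.Dict.get?]
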